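-- pv_equiv track=rewrite | github.com/fivestarhobbes/EasyLeague | grouputil.py | calculateSizeOfEachGroup
-- ===== SOURCE A (Python) =====
-- def calculateSizeOfEachGroup(numberOfPlayers, numberOfGroups):
--     if numberOfPlayers == 8:
--         return [4, 4]
--     if numberOfPlayers <= 7:
--         return [numberOfPlayers]
--     groupSizeList = [5 for x in range(numberOfGroups)]
--     playersLeftOver = numberOfPlayers % 5
--     index = len(groupSizeList) - 1
--     while playersLeftOver > 0:
--         groupSizeList[index] += 1
--         playersLeftOver -= 1
--         if index == 0:
--             index = len(groupSizeList) - 1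
--         else:
--             index -= 1
--     return groupSizeList
-- ===== SOURCE B (Python) =====
-- def calculateSizeOfEachGroup(numberOfPlayers, numberOfGroups):
--     if numberOfPlayers == 8:
--         return [4, 4]
--     if numberOfPlayers <= 7:
--         return [numberOfPlayers]
--     leftover = numberOfPlayers % 5
--     if leftover == 0:
--         return [5] * numberOfGroups
--     full, rem = divmod(leftover, numberOfGroups)
--     return [5 + full] * (numberOfGroups - rem) + [6 + full] * rem
-- ===== Notes on version B (the rewrite author's own statement) =====
-- stated objective: simpler
-- what changed: Replaces the one-increment-at-a-time wrapping while-loop with a direct divmod computation that builds the final group sizes as two replicated blocks.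
import Mathlib
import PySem

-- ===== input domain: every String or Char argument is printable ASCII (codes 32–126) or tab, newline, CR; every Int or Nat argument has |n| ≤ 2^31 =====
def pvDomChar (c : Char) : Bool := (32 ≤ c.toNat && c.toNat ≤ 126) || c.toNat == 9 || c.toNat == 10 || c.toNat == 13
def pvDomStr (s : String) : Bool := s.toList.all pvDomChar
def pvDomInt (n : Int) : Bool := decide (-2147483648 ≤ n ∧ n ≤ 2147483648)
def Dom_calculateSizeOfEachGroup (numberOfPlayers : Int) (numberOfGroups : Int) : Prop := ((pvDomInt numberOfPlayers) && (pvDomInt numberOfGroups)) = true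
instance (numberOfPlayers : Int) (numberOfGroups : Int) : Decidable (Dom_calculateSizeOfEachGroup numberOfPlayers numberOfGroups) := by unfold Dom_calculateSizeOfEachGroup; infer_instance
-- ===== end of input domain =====

-- B replaces A's one-increment-at-a-time wrapping while-loop by a direct divmod
-- computation building the result as two replicated blocks (simpler decomposition).

-- ===== PORT A =====
-- the while-loop of A, fuelled by playersLeftOver (which decreases by exactly 1 each pass)
def pvALoop : Nat → List Int → Int → List Int
  | 0, groupSizeList, _ => groupSizeList
  | Nat.succ n, groupSizeList, index =>
      -- groupSizeList[index] += 1  (in-range under Pre_; pySetD/pyGetD are Python's indexing)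
      let l' := PySem.List.pySetD groupSizeList index
                  (PySem.List.pyGetD groupSizeList index 0 + 1)
      let index' := if index = 0 then (l'.length : Int) - 1 else index - 1
      pvALoop n l' index'

def calculateSizeOfEachGroup (numberOfPlayers : Int) (numberOfGroups : Int) : List Int :=
  if numberOfPlayers = 8 then [4, 4]
  else if numberOfPlayers ≤ 7 then [numberOfPlayers]
  else
    let groupSizeList := (PySem.List.pyRange 0 numberOfGroups 1).map (fun _ => (5 : Int))
    let playersLeftOver := PySem.Int.mod numberOfPlayers 5
    pvALoop playersLeftOver.toNat groupSizeList ((groupSizeList.length : Int) - 1)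

-- ===== PORT B =====
def calculateSizeOfEachGroup_alt (numberOfPlayers : Int) (numberOfGroups : Int) : List Int :=
  if numberOfPlayers = 8 then [4, 4]
  else if numberOfPlayers ≤ 7 then [numberOfPlayers]
  else
    let leftover := PySem.Int.mod numberOfPlayers 5
    if leftover = 0 then List.replicate numberOfGroups.toNat 5
    else
      let full := PySem.Int.floordiv leftover numberOfGroups
      let rem := PySem.Int.mod leftover numberOfGroups
      List.replicate (numberOfGroups - rem).toNat (5 + full) ++
        List.replicate rem.toNat (6 + full)

-- ===== PRECONDITION & SPEC =====
-- Pre_ excludes exactly the inputs on which A raises IndexError: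
-- numberOfPlayers ≥ 9 with a positive leftover (numberOfPlayers % 5 > 0) and numberOfGroups ≤ 0.
def Pre_calculateSizeOfEachGroup (numberOfPlayers : Int) (numberOfGroups : Int) : Prop :=
  numberOfPlayers = 8 ∨ numberOfPlayers ≤ 7 ∨
    PySem.Int.mod numberOfPlayers 5 = 0 ∨ 1 ≤ numberOfGroups
instance (numberOfPlayers : Int) (numberOfGroups : Int) : Decidable (Pre_calculateSizeOfEachGroup numberOfPlayers numberOfGroups) := by unfold Pre_calculateSizeOfEachGroup; infer_instance

def pvWitness_calculateSizeOfEachGroup : Int × Int := (19, 3)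


def Spec_calculateSizeOfEachGroup (numberOfPlayers : Int) (numberOfGroups : Int) (out : List Int) : Prop := out = calculateSizeOfEachGroup_alt numberOfPlayers numberOfGroups
instance (numberOfPlayers : Int) (numberOfGroups : Int) (out : List Int) : Decidable (Spec_calculateSizeOfEachGroup numberOfPlayers numberOfGroups out) := by unfold Spec_calculateSizeOfEachGroup; infer_instance

-- ===== CLAIM (what is proved, stated in full; the proofs are below) =====
def Claim_equal_calculateSizeOfEachGroup : Prop := ∀ (numberOfPlayers : Int) (numberOfGroups : Int), Dom_calculateSizeOfEachGroup numberOfPlayers numberOfGroups → Pre_calculateSizeOfEachGroup numberOfPlayers numberOfGroups → Spec_calculateSizeOfEachGroup numberOfPlayers numberOfGroups (calculateSizeOfEachGroup numberOfPlayers numberOfGroups)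


-- ===== LEMMAS AND PROOFS =====

theorem pv_map_const_five (xs : List Int) :
    xs.map (fun _ => (5 : Int)) = List.replicate xs.length 5 := by
  induction xs with
  | nil => rfl
  | cons x xs ih => simp [List.replicate_succ, ih]

-- One pass of the loop on "replicate k 5 ++ replicate m 6" at index k-1, no wrap needed:
-- n ≤ k increments turn the last n fives into sixes.
theorem pv_loop_nowrap (n k m : Nat) (h : n ≤ k) :
    pvALoop n (List.replicate k (5 : Int) ++ List.replicate m 6) ((k : Int) - 1)
      = List.replicate (k - n) 5 ++ List.replicate (m + n) 6 := by
  induction n generalizing k m with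
  | zero => simp [pvALoop]
  | succ n ih =>
    obtain ⟨k', rfl⟩ : ∃ k', k = k' + 1 := ⟨k - 1, by omega⟩
    have hsplit : List.replicate (k' + 1) (5 : Int) ++ List.replicate m 6
        = List.replicate k' 5 ++ (5 : Int) :: List.replicate m 6 := by
      rw [List.replicate_succ' (n := k')]; simp
    have hidx : ((k' + 1 : Nat) : Int) - 1 = ((k' : Nat) : Int) := by push_cast; ring
    rw [pvALoop, hsplit, hidx]
    have hget : PySem.List.pyGetD (List.replicate k' (5:Int) ++ (5:Int) :: List.replicate m 6) ((k' : Nat) : Int) 0 = 5 := by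
      rw [PySem.List.pyGetD_natCast]
      rw [List.getD_eq_getElem?_getD, List.getElem?_append_right (by simp)]
      simp
    have hset : PySem.List.pySetD (List.replicate k' (5:Int) ++ (5:Int) :: List.replicate m 6) ((k' : Nat) : Int) ((5:Int) + 1)
        = List.replicate k' 5 ++ (6:Int) :: List.replicate m 6 := by
      rw [PySem.List.pySetD_natCast]
      rw [List.set_append_right _ _ (by simp)]
      simp
    rw [hget, hset]
    have hcons : List.replicate k' (5:Int) ++ (6:Int) :: List.replicate m 6
        = List.replicate k' 5 ++ List.replicate (m + 1) 6 := by
      simp [List.replicate_succ]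
    by_cases hk0 : ((k' : Nat) : Int) = 0
    · have : k' = 0 := by exact_mod_cast hk0
      subst this
      have hn : n = 0 := by omega
      subst hn
      simp [pvALoop, List.replicate_succ]
    · simp only [if_neg hk0]
      rw [hcons]
      have := ih k' (m + 1) (by omega)
      rw [this]
      have h1 : k' + 1 - (n + 1) = k' - n := by omega
      have h2 : m + 1 + n = m + (n + 1) := by omega
      rw [h1, h2]

-- the core: A's loop equals B's two-block formula, for leftover l ∈ [1,4] and g ≥ 1
theorem pv_loop_eq (l g : Int) (hl1 : 1 ≤ l) (hl4 : l ≤ 4) (hg : 1 ≤ g) :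
    pvALoop l.toNat (List.replicate g.toNat (5 : Int)) (g - 1)
      = List.replicate (g - PySem.Int.mod l g).toNat (5 + PySem.Int.floordiv l g) ++
          List.replicate (PySem.Int.mod l g).toNat (6 + PySem.Int.floordiv l g) := by
  by_cases hle : l ≤ g
  · -- no wrap: at most one increment per group
    have hcast : ((g.toNat : Nat) : Int) = g := by omega
    have hloop : pvALoop l.toNat (List.replicate g.toNat (5 : Int) ++ List.replicate 0 6) ((g.toNat : Int) - 1)
        = List.replicate (g.toNat - l.toNat) 5 ++ List.replicate (0 + l.toNat) 6 :=
      pv_loop_nowrap l.toNat g.toNat 0 (by omega)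
    rw [hcast] at hloop
    simp only [List.replicate_zero, List.append_nil, Nat.zero_add] at hloop
    rw [hloop]
    rw [PySem.Int.mod_eq_emod_of_pos (show (0:Int) < g by omega), PySem.Int.floordiv_eq_ediv_of_pos (show (0:Int) < g by omega)]
    by_cases heq : l = g
    · subst heq
      rw [Int.emod_self, Int.ediv_self (by omega)]
      have : (l - 0).toNat = l.toNat := by omega
      rw [this]
      norm_num
    · have hlt : l < g := by omega
      rw [Int.emod_eq_of_lt (by omega) hlt, Int.ediv_eq_zero_of_lt (by omega) hlt]
      have h1 : (g - l).toNat = g.toNat - l.toNat := by omega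
      rw [h1]
      norm_num
  · -- wrap: g < l ≤ 4, so g ∈ {1,2,3} and l ∈ {2,3,4}: finitely many concrete cases
    have hg3 : g ≤ 3 := by omega
    interval_cases g <;> interval_cases l <;> decide

-- ===== VERDICT (by name: the statement is the Claim_ definition above) =====
theorem calculateSizeOfEachGroup_spec : Claim_equal_calculateSizeOfEachGroup := by
  intro p g _ hpre
  unfold Spec_calculateSizeOfEachGroup calculateSizeOfEachGroup calculateSizeOfEachGroup_alt
  by_cases h8 : p = 8
  · simp [h8]
  · by_cases h7 : p ≤ 7
    · simp [h8, h7]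
    · simp only [if_neg h8, if_neg h7]
      have hp9 : 9 ≤ p := by omega
      have hmod : PySem.Int.mod p 5 = p % 5 := PySem.Int.mod_eq_emod_of_pos (by omega)
      have hbounds : 0 ≤ p % 5 ∧ p % 5 < 5 := ⟨Int.emod_nonneg _ (by omega), Int.emod_lt_of_pos _ (by omega)⟩
      have hinit : (PySem.List.pyRange 0 g 1).map (fun _ => (5 : Int)) = List.replicate g.toNat 5 := by
        rw [pv_map_const_five, PySem.List.length_pyRange_one]
        norm_num
      rw [hinit]
      by_cases hz : PySem.Int.mod p 5 = 0
      · rw [hz, if_pos rfl]; rfl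
      · have hg : 1 ≤ g := by
          rcases hpre with h | h | h | h
          · exact absurd h h8
          · exact absurd h h7
          · exact absurd h hz
          · exact h
        have hcastlen : (((List.replicate g.toNat (5:Int)).length : Nat) : Int) = g := by
          simp; omega
        rw [if_neg hz, hcastlen]
        exact pv_loop_eq (PySem.Int.mod p 5) g (by omega) (by omega) hg
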